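-- pv_equiv track=rewrite | github.com/JamesHh666/Parallel-LCS-algorithm | tools/multi_cpus.py | generate_input_list
-- ===== SOURCE A (Python) =====
-- def generate_input_list(length_seqB: int, num_cpu: int):
--     char_each_cpu = length_seqB // num_cpu  # number of chars to be computed by each cpu
--     char_left = length_seqB % num_cpu
--
--     length = [char_each_cpu] * num_cpu
--     for idx in range(char_left):
--         length[idx] += 1
--
--     res = []
--     pos = 0
--     for n in range(num_cpu):
--         if n == 0:
--             res.append([x for x in range(1, length[n])])
--             pos += length[n]
--         else:
--             res.append([x for x in range(pos, pos + length[n])])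
--             pos += length[n]
--     return res
-- ===== SOURCE B (Python) =====
-- def generate_input_list(length_seqB: int, num_cpu: int):
--     q = length_seqB // num_cpu
--     r = length_seqB % num_cpu
--     res = []
--     for n in range(num_cpu):
--         start = n * q + min(n, r)
--         ln = q + (1 if n < r else 0)
--         lo = 1 if n == 0 else start
--         res.append(list(range(lo, start + ln)))
--     return res
-- ===== Notes on version B (the rewrite author's own statement) =====
-- stated objective: simpler
-- what changed: Replaces A's materialised per-CPU length list (built by a mutation loop) and running pos accumulator with a single loop computing each block's start and length by the closed forms n*(L//N)+min(n, L%N) and L//N + (1 if n < L%N else 0).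
import Mathlib
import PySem

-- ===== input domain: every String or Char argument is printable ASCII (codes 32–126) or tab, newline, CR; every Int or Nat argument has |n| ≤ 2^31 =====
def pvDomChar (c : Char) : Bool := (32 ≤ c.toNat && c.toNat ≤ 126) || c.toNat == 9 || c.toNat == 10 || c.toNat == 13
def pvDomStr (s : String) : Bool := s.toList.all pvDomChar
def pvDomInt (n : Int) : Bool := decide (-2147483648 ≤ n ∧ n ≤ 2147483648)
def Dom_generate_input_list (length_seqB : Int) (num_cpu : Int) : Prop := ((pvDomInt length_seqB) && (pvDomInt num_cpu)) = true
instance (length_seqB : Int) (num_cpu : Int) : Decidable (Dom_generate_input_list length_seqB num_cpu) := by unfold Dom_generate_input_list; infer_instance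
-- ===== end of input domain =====

-- B replaces A's separate length list and running `pos` accumulator by a per-block closed-form
-- start/length arithmetic (objective: simpler decomposition, same cost).

-- ===== PORT A =====
def generate_input_list (length_seqB : Int) (num_cpu : Int) : List (List Int) :=
  let char_each_cpu := PySem.Int.floordiv length_seqB num_cpu
  let char_left := PySem.Int.mod length_seqB num_cpu
  let length := (PySem.List.pyRange 0 char_left 1).foldl
      (fun L idx => L.set idx.toNat (PySem.List.pyGetD L idx 0 + 1))
      (List.replicate num_cpu.toNat char_each_cpu)
  let step := fun (st : List (List Int) × Int) (n : Int) =>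
      if n == 0 then
        (st.1 ++ [PySem.List.pyRange 1 (PySem.List.pyGetD length n 0) 1],
         st.2 + PySem.List.pyGetD length n 0)
      else
        (st.1 ++ [PySem.List.pyRange st.2 (st.2 + PySem.List.pyGetD length n 0) 1],
         st.2 + PySem.List.pyGetD length n 0)
  ((PySem.List.pyRange 0 num_cpu 1).foldl step ([], 0)).1

-- ===== PORT B =====
def generate_input_list_alt (length_seqB : Int) (num_cpu : Int) : List (List Int) :=
  let q := PySem.Int.floordiv length_seqB num_cpu
  let r := PySem.Int.mod length_seqB num_cpu
  (PySem.List.pyRange 0 num_cpu 1).foldl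
    (fun res n =>
      let start := n * q + min n r
      let ln := q + (if n < r then (1:Int) else 0)
      let lo := if n == 0 then (1:Int) else start
      res ++ [PySem.List.pyRange lo (start + ln) 1]) []

-- ===== PRECONDITION & SPEC =====
-- Pre_ excludes exactly num_cpu = 0, where Python A raises ZeroDivisionError.
def Pre_generate_input_list (length_seqB : Int) (num_cpu : Int) : Prop := num_cpu ≠ 0
instance (length_seqB : Int) (num_cpu : Int) : Decidable (Pre_generate_input_list length_seqB num_cpu) := by unfold Pre_generate_input_list; infer_instance
def pvWitness_generate_input_list : Int × Int := (10, 3)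

def Spec_generate_input_list (length_seqB : Int) (num_cpu : Int) (out : List (List Int)) : Prop := out = generate_input_list_alt length_seqB num_cpu
instance (length_seqB : Int) (num_cpu : Int) (out : List (List Int)) : Decidable (Spec_generate_input_list length_seqB num_cpu out) := by unfold Spec_generate_input_list; infer_instance

-- ===== CLAIM (what is proved, stated in full; the proofs are below) =====
def Claim_equal_generate_input_list : Prop := ∀ (length_seqB : Int) (num_cpu : Int), Dom_generate_input_list length_seqB num_cpu → Pre_generate_input_list length_seqB num_cpu → Spec_generate_input_list length_seqB num_cpu (generate_input_list length_seqB num_cpu)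

-- ===== LEMMAS AND PROOFS =====

-- A's length-adjustment loop produces the explicit two-block list.
lemma buildLen (q : Int) (m : Nat) (r : Int) (hr : r ≤ (m : Int)) :
    ∀ fuel : Nat, ∀ j : Int, 0 ≤ j → j ≤ r → fuel = (r - j).toNat →
    (PySem.List.pyRange j r 1).foldl
        (fun L idx => L.set idx.toNat (PySem.List.pyGetD L idx 0 + 1))
        (List.replicate j.toNat (q + 1) ++ List.replicate (m - j.toNat) q)
      = List.replicate r.toNat (q + 1) ++ List.replicate (m - r.toNat) q := by
  intro fuel
  induction fuel with
  | zero =>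
      intro j h0 hjr hf
      have hj : j = r := by omega
      subst hj
      rw [PySem.List.pyRange_one_eq_nil le_rfl]
      simp
  | succ k ih =>
      intro j h0 hjr hf
      have hjlt : j < r := by omega
      rw [PySem.List.pyRange_one_cons hjlt]
      simp only [List.foldl_cons]
      have hjm : j.toNat < m := by omega
      have hrep : m - j.toNat = (m - j.toNat - 1) + 1 := by omega
      have hget : PySem.List.pyGetD
          (List.replicate j.toNat (q + 1) ++ List.replicate (m - j.toNat) q) j 0 = q := by
        rw [PySem.List.pyGetD_of_nonneg _ _ h0]
        rw [hrep, List.replicate_succ]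
        rw [List.getD_eq_getElem?_getD, List.getElem?_append_right (by simp)]
        simp
      rw [hget]
      have hset : (List.replicate j.toNat (q + 1) ++ List.replicate (m - j.toNat) q).set j.toNat (q + 1)
          = List.replicate (j + 1).toNat (q + 1) ++ List.replicate (m - (j + 1).toNat) q := by
        rw [List.set_append]
        simp only [List.length_replicate, lt_irrefl, if_false, Nat.sub_self]
        rw [hrep, List.replicate_succ, List.set_cons_zero,
            show (j + 1).toNat = j.toNat + 1 from by omega,
            show m - (j.toNat + 1) = m - j.toNat - 1 from by omega,
            List.replicate_succ' (n := j.toNat)]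
        simp
      rw [hset]
      exact ih (j + 1) (by omega) (by omega) (by omega)

-- reading the closed-form length list
lemma getLen (q : Int) (m : Nat) (r : Int) (h0 : 0 ≤ r) (hr : r ≤ (m : Int)) :
    ∀ n : Int, 0 ≤ n → n < (m : Int) →
    PySem.List.pyGetD (List.replicate r.toNat (q + 1) ++ List.replicate (m - r.toNat) q) n 0
      = q + (if n < r then (1:Int) else 0) := by
  intro n hn0 hnm
  rw [PySem.List.pyGetD_of_nonneg _ _ hn0, List.getD_eq_getElem?_getD]
  by_cases h : n < r
  · rw [List.getElem?_append_left (by simp; omega)]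
    simp [show n.toNat < r.toNat by omega, h]
  · rw [List.getElem?_append_right (by simp; omega)]
    simp only [List.length_replicate]
    simp [show n.toNat - r.toNat < m - r.toNat by omega, h]

-- main loop invariant: A's (res, pos) fold agrees with B's closed-form fold
lemma mainLoop (q r : Int) (m : Int) (h0 : 0 ≤ r) (hrm : r < m)
    (len : Int → Int) (hlen : ∀ n : Int, 0 ≤ n → n < m → len n = q + (if n < r then (1:Int) else 0)) :
    ∀ fuel : Nat, ∀ k : Int, 0 ≤ k → k ≤ m → fuel = (m - k).toNat → ∀ acc : List (List Int),
    ((PySem.List.pyRange k m 1).foldl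
        (fun (st : List (List Int) × Int) (n : Int) =>
          if n == 0 then
            (st.1 ++ [PySem.List.pyRange 1 (len n) 1], st.2 + len n)
          else
            (st.1 ++ [PySem.List.pyRange st.2 (st.2 + len n) 1], st.2 + len n))
        (acc, k * q + min k r)).1
    = (PySem.List.pyRange k m 1).foldl
        (fun res n =>
          res ++ [PySem.List.pyRange (if n == 0 then (1:Int) else n * q + min n r)
              (n * q + min n r + (q + (if n < r then (1:Int) else 0))) 1]) acc := by
  intro fuel
  induction fuel with
  | zero =>
      intro k hk0 hkm hf acc
      have : m ≤ k := by omega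
      rw [PySem.List.pyRange_one_eq_nil this]
      simp
  | succ t ih =>
      intro k hk0 hkm hf acc
      have hklt : k < m := by omega
      rw [PySem.List.pyRange_one_cons hklt]
      simp only [List.foldl_cons]
      rw [hlen k hk0 hklt]
      have hpos : k * q + min k r + (q + (if k < r then (1:Int) else 0))
          = (k + 1) * q + min (k + 1) r := by
        by_cases h : k < r
        · rw [if_pos h, show min k r = k from by omega, show min (k + 1) r = k + 1 from by omega]; ring
        · rw [if_neg h, show min k r = r from by omega, show min (k + 1) r = r from by omega]; ring
      by_cases hk : k = 0
      · subst hk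
        simp only [beq_self_eq_true, if_true]
        have hmin : min (1:Int) r = if (0:Int) < r then (1:Int) else 0 := by
          by_cases h : (0:Int) < r
          · rw [if_pos h]; omega
          · rw [if_neg h]; omega
        have := ih 1 (by omega) (by omega) (by omega)
            (acc ++ [PySem.List.pyRange 1 (q + (if (0:Int) < r then (1:Int) else 0)) 1])
        rw [hpos]
        simpa [hmin] using this
      · have hkne : (k == (0:Int)) = false := by simp [hk]
        simp only [hkne, if_false, Bool.false_eq_true]
        rw [hpos]
        exact ih (k + 1) (by omega) (by omega) (by omega)
            (acc ++ [PySem.List.pyRange (k * q + min k r) ((k + 1) * q + min (k + 1) r) 1])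

-- ===== VERDICT (by name: the statement is the Claim_ definition above) =====
theorem generate_input_list_spec : Claim_equal_generate_input_list := by
  intro L m _ hpre
  unfold Spec_generate_input_list generate_input_list generate_input_list_alt
  by_cases hm0 : m < 0
  · rw [PySem.List.pyRange_one_eq_nil (by omega)]
    simp
  · have hm : 0 < m := by
      rcases lt_trichotomy m 0 with h | h | h
      · exact absurd h hm0
      · exact absurd h hpre
      · exact h
    set q := PySem.Int.floordiv L m with hq
    set r := PySem.Int.mod L m with hr
    have hr0 : 0 ≤ r := PySem.Int.mod_nonneg L hm
    have hrm : r < m := PySem.Int.mod_lt L hm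
    have hmnat : (m.toNat : Int) = m := by omega
    have hbuild := buildLen q m.toNat r (by omega) (r - 0).toNat 0 le_rfl hr0 rfl
    simp only [Int.toNat_zero, List.replicate_zero, List.nil_append, Nat.sub_zero] at hbuild
    simp only [hbuild]
    have hlen : ∀ n : Int, 0 ≤ n → n < m →
        PySem.List.pyGetD (List.replicate r.toNat (q + 1) ++ List.replicate (m.toNat - r.toNat) q) n 0
          = q + (if n < r then (1:Int) else 0) := by
      intro n hn0 hnm
      exact getLen q m.toNat r hr0 (by omega) n hn0 (by omega)
    have := mainLoop q r m hr0 hrm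
        (fun n => PySem.List.pyGetD (List.replicate r.toNat (q + 1) ++ List.replicate (m.toNat - r.toNat) q) n 0)
        hlen (m - 0).toNat 0 le_rfl (by omega) rfl []
    simpa [show min (0:Int) r = 0 by omega] using this
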